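-- pv_equiv track=rewrite | github.com/TwoShock/Crypto-Algorithms | aes.py | transformInputToMatrix
-- ===== SOURCE A (Python) =====
-- from math import sqrt
--
-- def transformInputToMatrix(input):
--     inputMatrix = [input[i:i+2] for i in range(0,len(input),2)]
--     width = int(sqrt(len(inputMatrix)))
--     state = [[0 for j in range(width)]for i in range(width)]
--     for i in range(width):
--         for j in range(width):
--             state[j][i] = inputMatrix[i*width + j]
--     return state
-- ===== SOURCE B (Python) =====
-- from math import sqrt
--
-- def transformInputToMatrix(input):
--     chunks = [input[i:i+2] for i in range(0, len(input), 2)]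
--     width = int(sqrt(len(chunks)))
--     rows = [chunks[r*width:(r+1)*width] for r in range(width)]
--     return [list(col) for col in zip(*rows)]
-- ===== Notes on version B (the rewrite author's own statement) =====
-- stated objective: idiomatic
-- what changed: Replaces the preallocated zero matrix mutated by an explicit double index-arithmetic loop (state[j][i] = chunks[i*width+j]) with a build-rows-then-transpose decomposition: slice the chunk list into width rows and transpose with zip(*rows).
import Mathlib
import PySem

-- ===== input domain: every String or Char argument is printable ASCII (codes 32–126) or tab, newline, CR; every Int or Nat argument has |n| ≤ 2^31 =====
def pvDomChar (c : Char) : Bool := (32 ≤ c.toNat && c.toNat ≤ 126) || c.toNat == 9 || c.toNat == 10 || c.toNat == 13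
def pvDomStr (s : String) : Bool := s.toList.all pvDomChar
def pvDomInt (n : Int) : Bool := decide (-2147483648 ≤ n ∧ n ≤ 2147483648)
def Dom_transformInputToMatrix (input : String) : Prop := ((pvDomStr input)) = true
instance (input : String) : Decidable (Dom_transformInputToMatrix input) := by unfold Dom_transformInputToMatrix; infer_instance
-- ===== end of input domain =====

-- B reshapes by slicing the chunk list into rows and transposing with zip(*rows) instead of
-- A's index-arithmetic assignment loop into a preallocated matrix (idiomatic decomposition, same cost).

-- ===== PORT A =====
-- int(sqrt(n)) ported as Nat.sqrt: exact for every feasible chunk count (float sqrt is exact far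
-- beyond 2^31); the 0-filled matrix is seeded with "" since every cell is overwritten.
def transformInputToMatrix (input : String) : List (List String) :=
  let inputMatrix := (PySem.List.pyRange 0 (PySem.Str.len input) 2).map
      (fun i => PySem.Str.slice input (some i) (some (i + 2)))
  let width := Nat.sqrt inputMatrix.length
  let state := List.replicate width (List.replicate width "")
  (List.range width).foldl (fun st i =>
    (List.range width).foldl (fun st j =>
      st.set j ((st.getD j []).set i (inputMatrix.getD (i * width + j) ""))) st) state

-- ===== PORT B =====
-- zip(*rows): columns of the row list, stopping at the shortest row; zip() of no rows is [].
def pyZipStar (rows : List (List String)) : List (List String) :=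
  if h : rows = [] then []
  else if h2 : rows.any (·.isEmpty) then []
  else (rows.map (fun r => r.headD "")) :: pyZipStar (rows.map (fun r => r.tail))
termination_by (rows.headD []).length
decreasing_by
  match rows, h with
  | r :: rs, _ =>
    simp only [List.any_cons, Bool.or_eq_true, not_or] at h2
    simp only [List.map_cons, List.headD_cons]
    have hr : r ≠ [] := by simpa [List.isEmpty_iff] using h2.1
    cases r with
    | nil => exact absurd rfl hr
    | cons a l => simp

def transformInputToMatrix_alt (input : String) : List (List String) :=
  let chunks := (PySem.List.pyRange 0 (PySem.Str.len input) 2).map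
      (fun i => PySem.Str.slice input (some i) (some (i + 2)))
  let width := Nat.sqrt chunks.length
  let rows := (List.range width).map
      (fun r => PySem.List.slice chunks (some ((r * width : Nat) : Int)) (some (((r + 1) * width : Nat) : Int)))
  pyZipStar rows

-- ===== PRECONDITION & SPEC =====
def Spec_transformInputToMatrix (input : String) (out : List (List String)) : Prop := out = transformInputToMatrix_alt input
instance (input : String) (out : List (List String)) : Decidable (Spec_transformInputToMatrix input out) := by unfold Spec_transformInputToMatrix; infer_instance

-- ===== CLAIM (what is proved, stated in full; the proofs are below) =====
def Claim_equal_transformInputToMatrix : Prop := ∀ (input : String), Dom_transformInputToMatrix input → Spec_transformInputToMatrix input (transformInputToMatrix input)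

-- ===== LEMMAS AND PROOFS =====

-- a foldl over range n that rewrites the cell at each index in turn, elementwise
lemma foldl_set_range {α : Type} (d : α) (f : Nat → α → α) :
    ∀ (n : Nat) (st : List α), n ≤ st.length →
    (List.range n).foldl (fun s j => s.set j (f j (s.getD j d))) st
      = (List.range n).map (fun j => f j (st.getD j d)) ++ st.drop n := by
  intro n
  induction n with
  | zero => simp
  | succ n ih =>
    intro st hn
    have hlt : n < st.length := by omega
    rw [List.range_succ, List.foldl_append, ih st (by omega), List.map_append,
        List.foldl_cons, List.foldl_nil]
    have hpre : ((List.range n).map (fun j => f j (st.getD j d))).length = n := by simp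
    have hdropc : st.drop n = st[n] :: st.drop (n + 1) := List.drop_eq_getElem_cons hlt
    have hgetD : ((List.range n).map (fun j => f j (st.getD j d)) ++ st.drop n).getD n d
        = st.getD n d := by
      rw [List.getD_append_right _ _ _ _ (by simp), hpre, Nat.sub_self, hdropc]
      simp [List.getD_eq_getElem?_getD, List.getElem?_eq_getElem hlt]
    rw [hgetD, List.set_append_right _ _ (by simp), hpre, Nat.sub_self, hdropc]
    simp only [List.set_cons_zero, List.map_append, List.map_cons,
      List.map_nil, List.append_assoc, List.cons_append, List.nil_append]

-- a slice with enough elements, elementwise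
lemma drop_take_eq_map_range {α : Type} (d : α) (xs : List α) (a w : Nat)
    (h : a + w ≤ xs.length) :
    (xs.drop a).take w = (List.range w).map (fun t => xs.getD (a + t) d) := by
  apply List.ext_getElem
  · simp; omega
  · intro t h1 h2
    have ht : t < w := by simpa using h2
    have hat : a + t < xs.length := by omega
    simp [List.getD_eq_getElem?_getD, List.getElem?_eq_getElem hat]

-- zip(*rows) of a rectangular nonempty row list is the list of its w columns
lemma pyZipStar_rect :
    ∀ (w : Nat) (rows : List (List String)), rows ≠ [] →
    (∀ r ∈ rows, r.length = w) →
    pyZipStar rows = (List.range w).map (fun i => rows.map (fun row => row.getD i "")) := by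
  intro w
  induction w with
  | zero =>
    intro rows hne hlen
    have hany : rows.any (·.isEmpty) = true := by
      match rows with
      | r :: rs =>
        have : r.length = 0 := hlen r (by simp)
        simp [List.eq_nil_of_length_eq_zero this]
    rw [pyZipStar]
    simp [hne, hany]
  | succ w ih =>
    intro rows hne hlen
    have hanyf : rows.any (·.isEmpty) = false := by
      rw [List.any_eq_false]
      intro r hr
      have : r.length = w + 1 := hlen r hr
      simp [List.isEmpty_iff]
      exact List.ne_nil_of_length_eq_add_one this
    rw [pyZipStar]
    simp only [hne, hanyf, Bool.false_eq_true, dite_eq_ite, if_false]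
    have htl : pyZipStar (rows.map (fun r => r.tail))
        = (List.range w).map (fun i => (rows.map (fun r => r.tail)).map (fun row => row.getD i "")) := by
      apply ih
      · simpa using hne
      · intro r hr
        rcases List.mem_map.mp hr with ⟨r0, hr0, rfl⟩
        have : r0.length = w + 1 := hlen r0 hr0
        simp [this]
    rw [htl, List.range_succ_eq_map, List.map_cons]
    congr 1
    · apply List.map_congr_left
      intro r _
      cases r <;> simp
    · rw [List.map_map]
      apply List.map_congr_left
      intro i _
      rw [List.map_map]
      apply List.map_congr_left
      intro r _
      cases r <;> simp

-- the generic core: both sides over an arbitrary chunk list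
lemma core (cs : List String) :
    (List.range (Nat.sqrt cs.length)).foldl (fun st i =>
      (List.range (Nat.sqrt cs.length)).foldl (fun st j =>
        st.set j ((st.getD j []).set i (cs.getD (i * Nat.sqrt cs.length + j) ""))) st)
      (List.replicate (Nat.sqrt cs.length) (List.replicate (Nat.sqrt cs.length) ""))
    = pyZipStar ((List.range (Nat.sqrt cs.length)).map
        (fun r => PySem.List.slice cs (some ((r * Nat.sqrt cs.length : Nat) : Int))
                                      (some (((r + 1) * Nat.sqrt cs.length : Nat) : Int)))) := by
  set n := cs.length with hn
  set w := Nat.sqrt n with hw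
  have hww : w * w ≤ n := Nat.sqrt_le n
  -- the B side: each slice-row is a row of chunk lookups
  have hrows : ∀ r < w,
      PySem.List.slice cs (some ((r * w : Nat) : Int)) (some (((r + 1) * w : Nat) : Int))
        = (List.range w).map (fun t => cs.getD (r * w + t) "") := by
    intro r hr
    rw [PySem.List.slice_natCast]
    have hsub : (r + 1) * w - r * w = w := by
      have : (r + 1) * w = r * w + w := by ring
      omega
    rw [hsub]
    apply drop_take_eq_map_range
    calc r * w + w = (r + 1) * w := by ring
      _ ≤ w * w := Nat.mul_le_mul_right w hr
      _ ≤ n := hww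
  -- the A side: the nested assignment loops fill row j with the chunks i*w + j
  have houter : ∀ k, k ≤ w →
      (List.range k).foldl (fun st i =>
        (List.range w).foldl (fun st j =>
          st.set j ((st.getD j []).set i (cs.getD (i * w + j) ""))) st)
        (List.replicate w (List.replicate w ""))
      = (List.range w).map (fun j =>
          (List.range k).foldl (fun row i => row.set i (cs.getD (i * w + j) "")) (List.replicate w "")) := by
    intro k
    induction k with
    | zero => simp [List.map_const']
    | succ k ih =>
      intro hk
      rw [List.range_succ, List.foldl_append, ih (by omega), List.foldl_cons, List.foldl_nil]
      have hinner := foldl_set_range [] (fun j row => row.set k (cs.getD (k * w + j) "")) w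
        ((List.range w).map (fun j =>
          (List.range k).foldl (fun row i => row.set i (cs.getD (i * w + j) "")) (List.replicate w "")))
        (by simp)
      simp only [] at hinner
      rw [hinner, List.drop_eq_nil_of_le (by simp), List.append_nil]
      apply List.map_congr_left
      intro j hj
      have hjw : j < w := List.mem_range.mp hj
      rw [PySem.List.getD_map_range _ _ _ _ hjw, List.foldl_append,
        List.foldl_cons, List.foldl_nil]
  rw [houter w le_rfl]
  -- collapse each A-row with the foldl-set lemma
  have hrow : ∀ j, (List.range w).foldl (fun row i => row.set i (cs.getD (i * w + j) "")) (List.replicate w "")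
      = (List.range w).map (fun i => cs.getD (i * w + j) "") := by
    intro j
    have := foldl_set_range "" (fun i _ => cs.getD (i * w + j) "") w (List.replicate w "") (by simp)
    simpa using this
  -- collapse the B side with the zip lemma
  by_cases hw0 : w = 0
  · rw [hw0, pyZipStar]
    simp
  · rw [List.map_congr_left (fun r hr => hrows r (List.mem_range.mp hr)),
      pyZipStar_rect w _ (by simp [List.range_eq_nil, hw0]) (by
        intro r hr
        rcases List.mem_map.mp hr with ⟨r0, _, rfl⟩
        simp)]
    apply List.map_congr_left
    intro i hi
    have hiw : i < w := List.mem_range.mp hi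
    rw [hrow i, List.map_map]
    apply List.map_congr_left
    intro r hr
    have hrw : r < w := List.mem_range.mp hr
    simp only [Function.comp]
    rw [PySem.List.getD_map_range _ _ _ _ hiw]

-- ===== VERDICT (by name: the statement is the Claim_ definition above) =====
theorem transformInputToMatrix_spec : Claim_equal_transformInputToMatrix := by
  intro input _
  unfold Spec_transformInputToMatrix transformInputToMatrix transformInputToMatrix_alt
  exact core _
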